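-- pv_equiv track=rewrite | github.com/mondrian-scwgs/mondrian_utils | mondrianutils/normalizer/heatmap.py | get_chr_idxs
-- ===== SOURCE A (Python) =====
-- def get_chr_idxs(bins):
--     """
--     :param bins: sorted bins used for the plot
--     :return chr_idxs: list with the index where chromosome changes
--     returns the index where the chromosome changes
--     used for marking chr boundaries on the plot
--     """
--     # chr 1 starts at beginning
--     chr_idxs = [0]
--
--     chrom = bins[0][0]
--     for i, bin_v in enumerate(bins):
--         if bin_v[0] != chrom:
--             chr_idxs.append(i)
--             chrom = bin_v[0]
--
--     return chr_idxs
-- ===== SOURCE B (Python) =====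
-- def _run_len(rest, c):
--     # length of the leading run of bins whose chromosome equals c
--     k = 0
--     while k < len(rest) and rest[k][0] == c:
--         k += 1
--     return k
--
--
-- def get_chr_idxs(bins):
--     # walk the list run by run: record the start offset of each run of
--     # equal chromosome labels, then skip the whole run at once
--     out = []
--     idx = 0
--     rest = bins
--     while rest:
--         out.append(idx)
--         k = _run_len(rest, rest[0][0])
--         idx += k
--         rest = rest[k:]
--     return out
-- ===== Notes on version B (the rewrite author's own statement) =====
-- stated objective: alternative
-- what changed: B walks the sorted bins run by run, recording each run's start offset and skipping the whole run, instead of A's single enumerate scan with a sentinel chromosome variable; B returns [] on empty input where A raises.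
-- outside the precondition, e.g. on get_chr_idxs([]): A raises IndexError, B returns []
-- crash fix: On empty bins A raises IndexError (bins[0][0]); B naturally returns []. — e.g. on get_chr_idxs([]): A raises IndexError, B returns []
import Mathlib
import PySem

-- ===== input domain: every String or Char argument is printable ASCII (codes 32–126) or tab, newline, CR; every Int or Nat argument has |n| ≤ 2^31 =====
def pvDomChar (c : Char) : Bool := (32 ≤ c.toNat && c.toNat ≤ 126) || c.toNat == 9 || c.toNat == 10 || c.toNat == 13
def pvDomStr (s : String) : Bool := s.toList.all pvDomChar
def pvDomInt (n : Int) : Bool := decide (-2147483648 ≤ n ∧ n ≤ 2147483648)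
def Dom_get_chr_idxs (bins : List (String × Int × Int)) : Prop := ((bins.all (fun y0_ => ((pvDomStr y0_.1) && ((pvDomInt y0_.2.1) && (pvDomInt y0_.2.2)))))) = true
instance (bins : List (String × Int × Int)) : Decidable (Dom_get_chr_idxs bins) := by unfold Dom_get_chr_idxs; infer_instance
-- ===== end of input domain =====

-- B walks the bins run by run (record each run's start offset, skip the run) instead of
-- A's enumerate scan with a sentinel chromosome variable; same cost, different decomposition.

-- ===== PORT A =====
def get_chr_idxs (bins : List (String × Int × Int)) : List Int :=
  match PySem.List.pyGet? bins 0 with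
  | none => []  -- Python raises IndexError here (bins[0][0]); excluded by Pre_
  | some b0 =>
    ((PySem.List.enumerate bins 0).foldl
      (fun (st : List Int × String) (p : Int × (String × Int × Int)) =>
        if p.2.1 ≠ st.2 then (st.1 ++ [p.1], p.2.1) else st)
      ([0], b0.1)).1

-- ===== PORT B =====
-- _run_len: length of the leading run of bins whose chromosome equals c
def runLen (rest : List (String × Int × Int)) (c : String) : Nat :=
  match rest with
  | [] => 0
  | b :: t => if b.1 = c then runLen t c + 1 else 0

-- the outer while loop of Source B: record idx, skip the run, continue on the remainder
def altLoop (rest : List (String × Int × Int)) (idx : Int) : List Int :=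
  match rest with
  | [] => []
  | b :: t =>
    let k := runLen (b :: t) b.1
    idx :: altLoop ((b :: t).drop k) (idx + (k : Int))
termination_by rest.length
decreasing_by simp [runLen, List.length_drop]

def get_chr_idxs_alt (bins : List (String × Int × Int)) : List Int :=
  altLoop bins 0

-- ===== PRECONDITION & SPEC =====
-- Pre_ excludes only the empty list, on which A raises IndexError (bins[0][0]).
def Pre_get_chr_idxs (bins : List (String × Int × Int)) : Prop := bins ≠ []
instance (bins : List (String × Int × Int)) : Decidable (Pre_get_chr_idxs bins) := by unfold Pre_get_chr_idxs; infer_instance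
def pvWitness_get_chr_idxs : (List (String × Int × Int)) := [("1", 0, 1), ("2", 0, 1)]

-- On empty bins A raises IndexError (bins[0][0]); B naturally returns [].
def Raises_get_chr_idxs (bins : List (String × Int × Int)) : Prop := bins = []
instance (bins : List (String × Int × Int)) : Decidable (Raises_get_chr_idxs bins) := by unfold Raises_get_chr_idxs; infer_instance
def pvRaiseWitness_get_chr_idxs : (List (String × Int × Int)) := []
def pvRaiseWitnessOut_get_chr_idxs : List Int := []

def Spec_get_chr_idxs (bins : List (String × Int × Int)) (out : List Int) : Prop := out = get_chr_idxs_alt bins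
instance (bins : List (String × Int × Int)) (out : List Int) : Decidable (Spec_get_chr_idxs bins out) := by unfold Spec_get_chr_idxs; infer_instance

-- ===== CLAIM (what is proved, stated in full; the proofs are below) =====
def Claim_equal_get_chr_idxs : Prop := ∀ (bins : List (String × Int × Int)), Dom_get_chr_idxs bins → Pre_get_chr_idxs bins → Spec_get_chr_idxs bins (get_chr_idxs bins)
def Claim_raises_get_chr_idxs : Prop := (∀ (bins : List (String × Int × Int)), Dom_get_chr_idxs bins → Raises_get_chr_idxs bins → ¬ Pre_get_chr_idxs bins) ∧ (Dom_get_chr_idxs (pvRaiseWitness_get_chr_idxs) ∧ Raises_get_chr_idxs (pvRaiseWitness_get_chr_idxs) ∧ get_chr_idxs_alt (pvRaiseWitness_get_chr_idxs) = pvRaiseWitnessOut_get_chr_idxs)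

-- ===== LEMMAS AND PROOFS =====

-- A's loop body, as a recursion over the remaining bins with running index i and sentinel c
def aLoop : List (String × Int × Int) → Int → String → List Int
  | [], _, _ => []
  | b :: t, i, c => if b.1 ≠ c then i :: aLoop t (i + 1) b.1 else aLoop t (i + 1) c

theorem foldl_eq_aLoop (l : List (String × Int × Int)) :
    ∀ (s : Int) (acc : List Int) (c : String),
      ((PySem.List.enumerate l s).foldl
        (fun (st : List Int × String) (p : Int × (String × Int × Int)) =>
          if p.2.1 ≠ st.2 then (st.1 ++ [p.1], p.2.1) else st)
        (acc, c)).1 = acc ++ aLoop l s c := by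
  induction l with
  | nil => intro s acc c; simp [PySem.List.enumerate_nil, aLoop]
  | cons b t ih =>
    intro s acc c
    rw [PySem.List.enumerate_cons, List.foldl_cons]
    by_cases h : b.1 = c
    · rw [show (if (s, b).2.1 ≠ (acc, c).2 then ((acc, c).1 ++ [(s, b).1], (s, b).2.1) else (acc, c))
            = (acc, c) from by simp [h]]
      rw [ih]
      simp [aLoop, h]
    · rw [show (if (s, b).2.1 ≠ (acc, c).2 then ((acc, c).1 ++ [(s, b).1], (s, b).2.1) else (acc, c))
            = (acc ++ [s], b.1) from by simp [h]]
      rw [ih]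
      simp [aLoop, h]

theorem aLoop_eq_altLoop (l : List (String × Int × Int)) :
    ∀ (i : Int) (c : String),
      aLoop l i c = altLoop (l.drop (runLen l c)) (i + (runLen l c : Int)) := by
  induction l with
  | nil => intro i c; rw [altLoop.eq_def]; simp [aLoop, runLen]
  | cons b t ih =>
    intro i c
    by_cases h : b.1 = c
    · have : aLoop (b :: t) i c = aLoop t (i + 1) c := by simp [aLoop, h]
      rw [this, ih]
      have hr : runLen (b :: t) c = runLen t c + 1 := by simp [runLen, h]
      rw [hr]
      have hd : (b :: t).drop (runLen t c + 1) = t.drop (runLen t c) := rfl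
      rw [hd]
      congr 1
      push_cast
      ring
    · have hr : runLen (b :: t) c = 0 := by simp [runLen, h]
      rw [hr]
      simp only [List.drop_zero, Nat.cast_zero, add_zero]
      rw [altLoop.eq_def]
      simp only []
      have hk : runLen (b :: t) b.1 = runLen t b.1 + 1 := by simp [runLen]
      simp only [hk]
      have hd : (b :: t).drop (runLen t b.1 + 1) = t.drop (runLen t b.1) := rfl
      rw [hd]
      have : aLoop (b :: t) i c = i :: aLoop t (i + 1) b.1 := by simp [aLoop, h]
      rw [this, ih]
      congr 2
      push_cast
      ring

-- ===== VERDICT (by name: the statement is the Claim_ definition above) =====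
theorem get_chr_idxs_spec : Claim_equal_get_chr_idxs := by
  intro bins _ hpre
  unfold Spec_get_chr_idxs
  match bins with
  | [] => exact absurd rfl hpre
  | b :: t =>
    show get_chr_idxs (b :: t) = get_chr_idxs_alt (b :: t)
    have hget : PySem.List.pyGet? (b :: t) 0 = some b := by
      simp [PySem.List.pyGet?, PySem.List.pyIdx?]
    simp only [get_chr_idxs, hget]
    rw [foldl_eq_aLoop, aLoop_eq_altLoop]
    unfold get_chr_idxs_alt
    conv_rhs => rw [altLoop.eq_def]
    simp

@[simp] theorem get_chr_idxs_raises : Claim_raises_get_chr_idxs := by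
  unfold Claim_raises_get_chr_idxs
  refine ⟨fun bins _ h hp => hp h, by decide, by decide, ?_⟩
  show get_chr_idxs_alt [] = []
  rw [get_chr_idxs_alt, altLoop.eq_def]
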